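-- pv_equiv track=rewrite | github.com/Musadalancikar/Codeforces-Python | 1843A-SashaandArrayColoring.py | sasha_and_array_coloring
-- ===== SOURCE A (Python) =====
-- def sasha_and_array_coloring(n, lst):
--     if n == 1:
--         return 0
--     elif n % 2 == 1:
--         total = 0
--         for i in range(n//2):
--             total += (max(lst) - min(lst))
--             lst.remove(max(lst))
--             lst.remove(min(lst))
--         return total
--     else:
--         total = 0
--         for i in range(n//2):
--             total += (max(lst) - min(lst))
--             lst.remove(max(lst))
--             lst.remove(min(lst))
--         return total
-- ===== SOURCE B (Python) =====
-- def sasha_and_array_coloring(n, lst):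
--     if n < 2:
--         return 0
--     k = n // 2
--     s = sorted(lst)
--     return sum(s[-k:]) - sum(s[:k])
-- ===== Notes on version B (the rewrite author's own statement) =====
-- stated objective: faster
-- what changed: Instead of repeatedly scanning for and removing the current max and min n//2 times (quadratic, and mutating lst), B sorts the list once and returns the sum of the top n//2 elements minus the sum of the bottom n//2 elements.
import Mathlib
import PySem

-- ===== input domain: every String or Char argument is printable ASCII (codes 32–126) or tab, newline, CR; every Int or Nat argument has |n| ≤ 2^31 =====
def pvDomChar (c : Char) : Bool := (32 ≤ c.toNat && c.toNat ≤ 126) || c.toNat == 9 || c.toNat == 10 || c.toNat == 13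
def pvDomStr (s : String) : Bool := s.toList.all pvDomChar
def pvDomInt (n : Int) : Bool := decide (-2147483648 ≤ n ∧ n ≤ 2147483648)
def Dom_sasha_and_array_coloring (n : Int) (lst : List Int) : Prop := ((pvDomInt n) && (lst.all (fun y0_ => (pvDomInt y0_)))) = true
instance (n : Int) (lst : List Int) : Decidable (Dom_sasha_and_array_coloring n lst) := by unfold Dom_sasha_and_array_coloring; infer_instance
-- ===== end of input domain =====

-- B replaces A's quadratic repeated max/min-scan-and-remove loop (which also empties lst in
-- place; equivalence here is about the RETURN value only — B does not mutate) by one sort and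
-- two slice sums; a timing run measured B asymptotically faster.

-- ===== PORT A =====
-- loop body of A, run range(n//2) times: total += max(lst)-min(lst); lst.remove(max(lst)); lst.remove(min(lst)).
-- Each `none` of max?/min?/remove? is where Python raises (empty list / value missing); Pre_ excludes those runs,
-- the fallback value returned there is irrelevant.
def pvLoopA : Nat → List Int → Int → Int
  | 0, _, total => total
  | k+1, l, total =>
    match PySem.List.max? l (fun x => x), PySem.List.min? l (fun x => x) with
    | some mx, some mn =>
      let total := total + (mx - mn)
      match PySem.List.remove? l mx with
      | some l1 =>
        match PySem.List.min? l1 (fun x => x) with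
        | some mn2 =>
          match PySem.List.remove? l1 mn2 with
          | some l2 => pvLoopA k l2 total
          | none => total
        | none => total
      | none => total
    | _, _ => total

def sasha_and_array_coloring (n : Int) (lst : List Int) : Int :=
  if n == 1 then 0
  else if PySem.Int.mod n 2 == 1 then
    pvLoopA (PySem.Int.floordiv n 2).toNat lst 0
  else
    pvLoopA (PySem.Int.floordiv n 2).toNat lst 0

-- ===== PORT B =====
def sasha_and_array_coloring_alt (n : Int) (lst : List Int) : Int :=
  if n < 2 then 0
  else
    let k := PySem.Int.floordiv n 2
    let s := PySem.List.sorted lst (fun x => x)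
    (PySem.List.slice s (some (-k)) none).sum - (PySem.List.slice s none (some k)).sum

-- ===== PRECONDITION & SPEC =====
-- Pre_ is exactly the set of inputs on which the Python A returns: for n ≥ 2 the loop removes
-- 2*(n//2) elements from lst and raises ValueError/"empty sequence" when lst is shorter; for
-- n ≤ 1 the loop body never runs and A returns 0 on any lst.
def Pre_sasha_and_array_coloring (n : Int) (lst : List Int) : Prop :=
  n ≤ 1 ∨ 2 * PySem.Int.floordiv n 2 ≤ (lst.length : Int)
instance (n : Int) (lst : List Int) : Decidable (Pre_sasha_and_array_coloring n lst) := by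
  unfold Pre_sasha_and_array_coloring; infer_instance

def pvWitness_sasha_and_array_coloring : Int × List Int := (4, [3, 1, 4, 1])

def Spec_sasha_and_array_coloring (n : Int) (lst : List Int) (out : Int) : Prop := out = sasha_and_array_coloring_alt n lst
instance (n : Int) (lst : List Int) (out : Int) : Decidable (Spec_sasha_and_array_coloring n lst out) := by unfold Spec_sasha_and_array_coloring; infer_instance

-- ===== CLAIM (what is proved, stated in full; the proofs are below) =====
def Claim_equal_sasha_and_array_coloring : Prop := ∀ (n : Int) (lst : List Int), Dom_sasha_and_array_coloring n lst → Pre_sasha_and_array_coloring n lst → Spec_sasha_and_array_coloring n lst (sasha_and_array_coloring n lst)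

-- ===== LEMMAS AND PROOFS =====

lemma pv_pairwise_le_getLast : ∀ (s : List Int), s.Pairwise (· ≤ ·) → ∀ (hne : s ≠ []),
    ∀ y ∈ s, y ≤ s.getLast hne := by
  intro s
  induction s with
  | nil => intro _ hne; exact absurd rfl hne
  | cons a t ih =>
    intro h hne y hy
    cases t with
    | nil => simp at hy; simp [hy]
    | cons b t0 =>
      rw [List.getLast_cons (by simp)]
      rcases List.mem_cons.mp hy with hy1 | hy2
      · subst hy1
        exact List.rel_of_pairwise_cons h (List.getLast_mem _)
      · exact ih h.of_cons (by simp) y hy2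

lemma pv_max?_sorted (s : List Int) (h : s.Pairwise (· ≤ ·)) (hne : s ≠ []) :
    PySem.List.max? s (fun x => x) = some (s.getLast hne) := by
  obtain ⟨m, hm⟩ : ∃ m, PySem.List.max? s (fun x => x) = some m := by
    cases hmx : PySem.List.max? s (fun x => x) with
    | none => exact absurd ((PySem.List.max?_eq_none_iff s _).mp hmx) hne
    | some m => exact ⟨m, rfl⟩
  rw [hm]
  have h1 : m ≤ s.getLast hne := pv_pairwise_le_getLast s h hne m (PySem.List.max?_mem hm)
  have h2 : s.getLast hne ≤ m := PySem.List.max?_isMax hm _ (List.getLast_mem hne)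
  exact congrArg some (le_antisymm h1 h2)

lemma pv_min?_sorted (a : Int) (t : List Int) (h : (a :: t).Pairwise (· ≤ ·)) :
    PySem.List.min? (a :: t) (fun x => x) = some a := by
  obtain ⟨m, hm⟩ : ∃ m, PySem.List.min? (a :: t) (fun x => x) = some m := by
    cases hmx : PySem.List.min? (a :: t) (fun x => x) with
    | none => simp [PySem.List.min?_eq_none_iff] at hmx
    | some m => exact ⟨m, rfl⟩
  rw [hm]
  have hmem := PySem.List.min?_mem hm
  have h1 : m ≤ a := PySem.List.min?_isMin hm a (by simp)
  have h2 : a ≤ m := by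
    rcases List.mem_cons.mp hmem with h3 | h3
    · exact le_of_eq h3.symm
    · exact List.rel_of_pairwise_cons h h3
  exact congrArg some (le_antisymm h1 h2)

lemma pv_erase_max_sorted : ∀ (s : List Int), s.Pairwise (· ≤ ·) → ∀ m ∈ s, (∀ y ∈ s, y ≤ m) →
    s.erase m = s.dropLast := by
  intro s
  induction s with
  | nil => intro _ m hm; simp at hm
  | cons a t ih =>
    intro h m hm hmax
    by_cases ham : a = m
    · subst ham
      have hall : ∀ y ∈ t, y = a := fun y hy =>
        le_antisymm (hmax y (by simp [hy])) (List.rel_of_pairwise_cons h hy)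
      rw [List.erase_cons_head]
      cases t with
      | nil => simp
      | cons b t0 =>
        have : b :: t0 = a :: (b :: t0).dropLast := by
          have hrep : b :: t0 = List.replicate (t0.length + 1) a := by
            rw [List.eq_replicate_iff]
            constructor
            · simp
            · intro y hy; exact hall y hy
          rw [hrep]
          cases h0 : t0.length with
          | zero => simp [List.replicate]
          | succ L => simp [List.replicate_succ]
             
        rw [List.dropLast_cons_of_ne_nil (by simp : (b :: t0) ≠ [])]
        exact this
    · have hmt : m ∈ t := by
        rcases List.mem_cons.mp hm with h3 | h3
        · exact absurd h3.symm ham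
        · exact h3
      have htne : t ≠ [] := by intro hc; rw [hc] at hmt; simp at hmt
      rw [List.erase_cons_tail (by simp [ham]),
          List.dropLast_cons_of_ne_nil htne,
          ih h.of_cons m hmt (fun y hy => hmax y (by simp [hy]))]

lemma pv_max?_eq_of_perm (s s' : List Int) (hp : s.Perm s') :
    PySem.List.max? s (fun x => x) = PySem.List.max? s' (fun x => x) := by
  cases hs : PySem.List.max? s (fun x => x) with
  | none =>
    rw [(PySem.List.max?_eq_none_iff s _).mp hs] at hp
    rw [(PySem.List.max?_eq_none_iff s' _).mpr hp.nil_eq.symm]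
  | some m =>
    cases hs' : PySem.List.max? s' (fun x => x) with
    | none =>
      rw [(PySem.List.max?_eq_none_iff s' _).mp hs'] at hp
      rw [hp.eq_nil] at hs
      rw [(PySem.List.max?_eq_none_iff ([] : List Int) (fun x => x)).mpr rfl] at hs
      cases hs
    | some m' =>
      have h1 : m ≤ m' := PySem.List.max?_isMax hs' m (hp.mem_iff.mp (PySem.List.max?_mem hs))
      have h2 : m' ≤ m := PySem.List.max?_isMax hs m' (hp.mem_iff.mpr (PySem.List.max?_mem hs'))
      rw [le_antisymm h1 h2]

lemma pv_min?_eq_of_perm (s s' : List Int) (hp : s.Perm s') :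
    PySem.List.min? s (fun x => x) = PySem.List.min? s' (fun x => x) := by
  cases hs : PySem.List.min? s (fun x => x) with
  | none =>
    rw [(PySem.List.min?_eq_none_iff s _).mp hs] at hp
    rw [(PySem.List.min?_eq_none_iff s' _).mpr hp.nil_eq.symm]
  | some m =>
    cases hs' : PySem.List.min? s' (fun x => x) with
    | none =>
      rw [(PySem.List.min?_eq_none_iff s' _).mp hs'] at hp
      rw [hp.eq_nil] at hs
      rw [(PySem.List.min?_eq_none_iff ([] : List Int) (fun x => x)).mpr rfl] at hs
      cases hs
    | some m' =>
      have h1 : m' ≤ m := PySem.List.min?_isMin hs' m (hp.mem_iff.mp (PySem.List.min?_mem hs))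
      have h2 : m ≤ m' := PySem.List.min?_isMin hs m' (hp.mem_iff.mpr (PySem.List.min?_mem hs'))
      rw [le_antisymm h2 h1]

lemma pv_loop_perm : ∀ (k : Nat) (s s' : List Int), s.Perm s' → ∀ (t : Int),
    pvLoopA k s t = pvLoopA k s' t := by
  intro k
  induction k with
  | zero => intro s s' _ t; rfl
  | succ k ih =>
    intro s s' hp t
    by_cases hnil : s = []
    · subst hnil
      rw [← hp.nil_eq]
    · have hnil' : s' ≠ [] := fun hc => hnil ((hc ▸ hp).eq_nil)
      obtain ⟨m, hm⟩ : ∃ m, PySem.List.max? s (fun x => x) = some m := by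
        cases hmx : PySem.List.max? s (fun x => x) with
        | none => exact absurd ((PySem.List.max?_eq_none_iff s _).mp hmx) hnil
        | some m => exact ⟨m, rfl⟩
      obtain ⟨p, hp0⟩ : ∃ p, PySem.List.min? s (fun x => x) = some p := by
        cases hmx : PySem.List.min? s (fun x => x) with
        | none => exact absurd ((PySem.List.min?_eq_none_iff s _).mp hmx) hnil
        | some p => exact ⟨p, rfl⟩
      have hm' : PySem.List.max? s' (fun x => x) = some m := (pv_max?_eq_of_perm s s' hp).symm.trans hm
      have hp0' : PySem.List.min? s' (fun x => x) = some p := (pv_min?_eq_of_perm s s' hp).symm.trans hp0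
      have hrem : PySem.List.remove? s m = some (s.erase m) :=
        PySem.List.remove?_eq_some_erase s m (PySem.List.max?_mem hm)
      have hrem' : PySem.List.remove? s' m = some (s'.erase m) :=
        PySem.List.remove?_eq_some_erase s' m (PySem.List.max?_mem hm')
      have hp1 : (s.erase m).Perm (s'.erase m) := hp.erase m
      simp only [pvLoopA, hm, hp0, hm', hp0', hrem, hrem']
      by_cases h1nil : s.erase m = []
      · have h2nil : s'.erase m = [] := ((h1nil ▸ hp1).symm).eq_nil
        rw [h1nil, h2nil]
      · have h1nil' : s'.erase m ≠ [] := fun hc => h1nil ((hc ▸ hp1).eq_nil)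
        obtain ⟨q, hq⟩ : ∃ q, PySem.List.min? (s.erase m) (fun x => x) = some q := by
          cases hmx : PySem.List.min? (s.erase m) (fun x => x) with
          | none => exact absurd ((PySem.List.min?_eq_none_iff _ _).mp hmx) h1nil
          | some q => exact ⟨q, rfl⟩
        have hq' : PySem.List.min? (s'.erase m) (fun x => x) = some q :=
          (pv_min?_eq_of_perm _ _ hp1).symm.trans hq
        have hr2 : PySem.List.remove? (s.erase m) q = some ((s.erase m).erase q) :=
          PySem.List.remove?_eq_some_erase _ q (PySem.List.min?_mem hq)
        have hr2' : PySem.List.remove? (s'.erase m) q = some ((s'.erase m).erase q) :=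
          PySem.List.remove?_eq_some_erase _ q (PySem.List.min?_mem hq')
        simp only [hq, hq', hr2, hr2']
        exact ih _ _ (hp1.erase q) _

lemma pv_loop_sorted : ∀ (k : Nat) (s : List Int) (t : Int), s.Pairwise (· ≤ ·) →
    2 * k ≤ s.length →
    pvLoopA k s t = t + (s.reverse.take k).sum - (s.take k).sum := by
  intro k
  induction k with
  | zero => intro s t _ _; simp [pvLoopA]
  | succ k ih =>
    intro s t h hlen
    cases s with
    | nil => simp at hlen
    | cons a t1 =>
      cases t1 with
      | nil => simp at hlen; omega
      | cons b t0 =>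
        have hne : (a :: b :: t0) ≠ [] := by simp
        have hlen' : 2 * (k + 1) ≤ t0.length + 2 := by simpa using hlen
        have hku : k ≤ t0.length := by omega
        set g := (a :: b :: t0).getLast hne with hg
        have hmax := pv_max?_sorted (a :: b :: t0) h hne
        have hmin := pv_min?_sorted a (b :: t0) h
        have hgmem : g ∈ (a :: b :: t0) := List.getLast_mem hne
        have hrem1 : PySem.List.remove? (a :: b :: t0) g = some ((a :: b :: t0).erase g) :=
          PySem.List.remove?_eq_some_erase _ g hgmem
        have herase : (a :: b :: t0).erase g = a :: (b :: t0).dropLast := by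
          rw [pv_erase_max_sorted (a :: b :: t0) h g hgmem (pv_pairwise_le_getLast _ h hne),
              List.dropLast_cons_of_ne_nil (by simp)]
        have hdlsub : (a :: (b :: t0).dropLast).Sublist (a :: b :: t0) :=
          List.Sublist.cons₂ a (List.dropLast_sublist _)
        have hpair1 : (a :: (b :: t0).dropLast).Pairwise (· ≤ ·) := h.sublist hdlsub
        have hmin2 := pv_min?_sorted a ((b :: t0).dropLast) hpair1
        have hrem2 : PySem.List.remove? (a :: (b :: t0).dropLast) a =
            some ((b :: t0).dropLast) := by
          rw [PySem.List.remove?_eq_some_erase _ a (by simp), List.erase_cons_head]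
        simp only [pvLoopA, hmax, ← hg, hmin, hrem1, herase, hmin2, hrem2]
        rw [ih ((b :: t0).dropLast) (t + (g - a)) hpair1.of_cons
              (by rw [List.length_dropLast]; simp; omega)]
        -- sum decompositions
        have htake : (a :: b :: t0).take (k+1) = a :: ((b :: t0).dropLast.take k) := by
          rw [List.take_succ_cons, List.dropLast_eq_take, List.take_take]
          congr 1
          simp
          omega
        have hrev : (a :: b :: t0).reverse.take (k+1) = g :: ((b :: t0).dropLast.reverse.take k) := by
          conv_lhs => rw [← List.dropLast_append_getLast hne]
          rw [List.reverse_append, ← hg]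
          have hcons : ([g].reverse ++ ((a :: b :: t0).dropLast).reverse)
              = g :: ((a :: b :: t0).dropLast).reverse := by simp
          rw [hcons, List.take_succ_cons]
          congr 1
          rw [List.dropLast_cons_of_ne_nil (by simp : (b :: t0) ≠ []), List.reverse_cons,
              List.take_append_of_le_length (by simp; omega)]
        rw [htake, hrev]
        simp only [List.sum_cons]
        ring

-- ===== VERDICT (by name: the statement is the Claim_ definition above) =====
theorem sasha_and_array_coloring_spec : Claim_equal_sasha_and_array_coloring := by
  intro n lst _ hpre
  unfold Spec_sasha_and_array_coloring
  unfold Pre_sasha_and_array_coloring at hpre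
  show sasha_and_array_coloring n lst = sasha_and_array_coloring_alt n lst
  have hfd : PySem.Int.floordiv n 2 = n / 2 := PySem.Int.floordiv_eq_ediv_of_pos (by norm_num)
  by_cases h2 : n < 2
  · -- n ≤ 1: the loop runs zero times on both parity branches; B returns 0
    have hK : (PySem.Int.floordiv n 2).toNat = 0 := by rw [hfd]; omega
    simp only [sasha_and_array_coloring, sasha_and_array_coloring_alt, hK, if_pos h2]
    split <;> [rfl; (split <;> simp [pvLoopA])]
  · -- n ≥ 2
    have hn2 : 2 ≤ n := by omega
    have hk1 : 1 ≤ n / 2 := by omega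
    set K : Nat := (PySem.Int.floordiv n 2).toNat with hKdef
    have hKcast : (K : Int) = PySem.Int.floordiv n 2 := by rw [hKdef, hfd]; omega
    have hKpos : 0 < K := by omega
    have hlen : 2 * K ≤ lst.length := by
      rcases hpre with h | h
      · omega
      · omega
    set s := PySem.List.sorted lst (fun x => x) with hs
    have hperm : lst.Perm s := (PySem.List.sorted_perm lst (fun x => x) false).symm
    have hslen : s.length = lst.length := PySem.List.length_sorted lst _ false
    have hA : sasha_and_array_coloring n lst
        = 0 + (s.reverse.take K).sum - (s.take K).sum := by
      have hrun : pvLoopA K lst 0 = 0 + (s.reverse.take K).sum - (s.take K).sum := by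
        rw [pv_loop_perm K lst s hperm 0]
        exact pv_loop_sorted K s 0 (PySem.List.sorted_pairwise lst _) (by omega)
      simp only [sasha_and_array_coloring]
      split
      · rename_i hc; simp at hc; omega
      · split <;> exact hrun
    have hB : sasha_and_array_coloring_alt n lst
        = (s.drop (s.length - K)).sum - (s.take K).sum := by
      simp only [sasha_and_array_coloring_alt, if_neg h2]
      rw [← hs, ← hKcast]
      rw [PySem.List.slice_from_neg_natCast s K hKpos,
          PySem.List.slice_to s (by exact_mod_cast Int.natCast_nonneg K)]
      simp
    rw [hA, hB, List.take_reverse, List.sum_reverse]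
    ring
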